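-- pv_equiv track=rewrite | github.com/josemalonsom/advent-of-code | python/src/year2015/day01.py | solve
-- ===== SOURCE A (Python) =====
-- UP = "("
--
-- def solve(puzzle_input):
--     input_array = ([*puzzle_input])
--     current_floor = 0
--     index_first_character_that_causes_entering_basement = None
--
--     for idx, character in enumerate(input_array):
--         current_floor += 1 if character == UP else -1
--
--         if index_first_character_that_causes_entering_basement is None and current_floor == -1:
--             index_first_character_that_causes_entering_basement = idx + 1
--
--     return {
--         "current_floor": current_floor,
--         "position_character_taking_to_basement": index_first_character_that_causes_entering_basement
--     }
-- ===== SOURCE B (Python) =====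
-- UP = "("
--
-- def solve(puzzle_input):
--     # Indices of the characters that move Santa DOWN (everything but "(").
--     downs = [i for i, c in enumerate(puzzle_input) if c != UP]
--     # ups - downs = (n - d) - d = n - 2d: no running floor needed.
--     current_floor = len(puzzle_input) - 2 * len(downs)
--     # The floor after the (k+1)-th down step at index i is i - 2k - 1; the first
--     # time the floor is -1 must be at a down step, hence the first k with i == 2k.
--     position = next((i + 1 for k, i in enumerate(downs) if i == 2 * k), None)
--     return {
--         "current_floor": current_floor,
--         "position_character_taking_to_basement": position
--     }
-- ===== Notes on version B (the rewrite author's own statement) =====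
-- stated objective: alternative
-- what changed: Replaces A's fused running-floor scan with a counting algorithm: only the indices of down characters are collected; current_floor is the closed form n - 2*len(downs), and the basement position is found arithmetically as the first down index i whose ordinal k satisfies i == 2k (the floor after the (k+1)-th down step is i - 2k - 1), with no running floor maintained at all.
import Mathlib
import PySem

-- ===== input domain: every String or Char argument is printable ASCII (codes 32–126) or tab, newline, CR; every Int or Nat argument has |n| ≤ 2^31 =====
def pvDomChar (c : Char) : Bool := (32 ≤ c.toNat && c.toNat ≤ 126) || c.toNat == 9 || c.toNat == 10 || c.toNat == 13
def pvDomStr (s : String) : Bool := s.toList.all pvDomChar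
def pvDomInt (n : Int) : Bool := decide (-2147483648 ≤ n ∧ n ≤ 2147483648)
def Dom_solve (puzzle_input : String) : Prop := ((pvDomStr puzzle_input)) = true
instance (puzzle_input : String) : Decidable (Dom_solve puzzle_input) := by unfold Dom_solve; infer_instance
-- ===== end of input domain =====

-- B replaces A's fused running-floor scan with a counting algorithm over the down-step indices only; alternative algorithm, same cost.


-- ===== PORT A =====
-- A's for-loop over enumerate(input_array), carrying (current_floor, first-basement-index).
def solveLoop : List Char → Int → Int → Option Int → Int × Option Int
  | [], _, f, p => (f, p)
  | c :: cs, idx, f, p =>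
    let f' := f + (if c = '(' then 1 else -1)
    let p' := if p = none ∧ f' = -1 then some (idx + 1) else p
    solveLoop cs (idx + 1) f' p'

def solve (puzzle_input : String) : List (String × Option Int) :=
  let r := solveLoop puzzle_input.toList 0 0 none
  [("current_floor", some r.1), ("position_character_taking_to_basement", r.2)]

-- ===== PORT B =====
-- B's comprehension: the indices of the down characters (everything but '(').
def downIdxs : List Char → Int → List Int
  | [], _ => []
  | c :: cs, idx => if c ≠ '(' then idx :: downIdxs cs (idx + 1) else downIdxs cs (idx + 1)

-- B's next(...): first down index i whose ordinal k satisfies i == 2k; result i + 1.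
def findPos : List Int → Int → Option Int
  | [], _ => none
  | i :: is, k => if i = 2 * k then some (i + 1) else findPos is (k + 1)

def solve_alt (puzzle_input : String) : List (String × Option Int) :=
  let downs := downIdxs puzzle_input.toList 0
  let current_floor : Int := (puzzle_input.toList.length : Int) - 2 * (downs.length : Int)
  let position := findPos downs 0
  [("current_floor", some current_floor), ("position_character_taking_to_basement", position)]

-- ===== PRECONDITION & SPEC =====
def Spec_solve (puzzle_input : String) (out : List (String × Option Int)) : Prop := out = solve_alt puzzle_input
instance (puzzle_input : String) (out : List (String × Option Int)) : Decidable (Spec_solve puzzle_input out) := by unfold Spec_solve; infer_instance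

-- ===== CLAIM (what is proved, stated in full; the proofs are below) =====
def Claim_equal_solve : Prop := ∀ (puzzle_input : String), Dom_solve puzzle_input → Spec_solve puzzle_input (solve puzzle_input)

-- ===== LEMMAS AND PROOFS =====

-- number of down characters
def downCount (cs : List Char) : Nat := cs.countP (fun c => !(c == '('))

theorem length_downIdxs (cs : List Char) : ∀ idx : Int, (downIdxs cs idx).length = downCount cs := by
  induction cs with
  | nil => intro idx; simp [downIdxs, downCount]
  | cons c cs ih =>
    intro idx
    by_cases h : c = '(' <;>
      simp [downIdxs, downCount, h, ih]

-- once the basement index is recorded, A's loop only accumulates the remaining floor delta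
theorem solveLoop_some (cs : List Char) : ∀ (idx f v : Int),
    solveLoop cs idx f (some v) = (f + ((cs.length : Int) - 2 * (downCount cs : Int)), some v) := by
  induction cs with
  | nil => intro idx f v; simp [solveLoop, downCount]
  | cons c cs ih =>
    intro idx f v
    by_cases h : c = '(' <;>
      simp [solveLoop, h, ih, downCount, Prod.ext_iff] <;> ring

-- A's fused scan, with no basement recorded yet and floor f = idx - 2k (k downs seen so far, floor
-- still nonnegative), equals B's arithmetic on the remaining down indices.
-- A's fused scan, with no basement recorded yet and floor f = idx - 2k (k downs seen so far,
-- floor still nonnegative), equals B's arithmetic on the remaining down indices.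
theorem solveLoop_eq (cs : List Char) : ∀ (idx k f : Int), f = idx - 2 * k → 0 ≤ f →
    solveLoop cs idx f none =
      (f + ((cs.length : Int) - 2 * (downCount cs : Int)), findPos (downIdxs cs idx) k) := by
  induction cs with
  | nil => intro idx k f hf h; simp [solveLoop, downIdxs, findPos, downCount]
  | cons c cs ih =>
    intro idx k f hf h
    by_cases hc : c = '('
    · -- up step: floor rises, cannot hit -1; same k, idx+1
      simp only [solveLoop, downIdxs, hc, ne_eq, not_true_eq_false, if_false, if_true, true_and]
      rw [if_neg (by omega), ih (idx + 1) k _ (by omega) (by omega)]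
      simp [Prod.ext_iff, downCount]
      omega
    · simp only [solveLoop, downIdxs, hc, ne_eq, not_false_eq_true, if_true, reduceIte, true_and]
      by_cases hk : idx = 2 * k
      · -- floor hits -1 here: A records idx+1; B finds the first ordinal k with idx = 2k
        rw [if_pos (by omega), solveLoop_some]
        simp [Prod.ext_iff, findPos, hk, downCount, hc]
        omega
      · -- floor stays ≥ 0: k+1 downs seen, idx+1
        rw [if_neg (by omega), ih (idx + 1) (k + 1) _ (by omega) (by omega)]
        simp [Prod.ext_iff, findPos, hk, downCount, hc]
        omega

-- ===== VERDICT (by name: the statement is the Claim_ definition above) =====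
theorem solve_spec : Claim_equal_solve := by
  intro s _
  unfold Spec_solve solve solve_alt
  rw [solveLoop_eq s.toList 0 0 0 (by norm_num) (by norm_num)]
  simp [length_downIdxs]
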